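-- pv_equiv track=rewrite | github.com/syncerpn/leetcode | 2374_node_with_highest_edge_score.py | edgeScore
-- ===== SOURCE A (Python) =====
-- from typing import List
--
-- def edgeScore(edges: List[int]) -> int:
--     ans, ma = 0, 0
--     d = [0] * len(edges)
--     for i, a in enumerate(edges):
--         d[a] += i
--         if ma < d[a]:
--             ma = d[a]
--             ans = a
--         elif ma == d[a] and a < ans:
--             ans = a
--
--     return ans
-- ===== SOURCE B (Python) =====
-- from typing import List
--
-- def edgeScore(edges: List[int]) -> int:
--     d = [0] * len(edges)
--     vals = [(0, 0)]
--     for i, a in enumerate(edges):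
--         d[a] += i
--         vals.append((d[a], a))
--     best = max(v for v, a in vals)
--     return min(a for v, a in vals if v == best)
-- ===== Notes on version B (the rewrite author's own statement) =====
-- stated objective: simpler
-- what changed: Replaces A's online running-max with tie-break bookkeeping inside the update loop by an offline decomposition: the loop only updates scores and records the (value, label) trace, and the answer is a separate max() plus filtered min() over that trace.
import Mathlib
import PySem

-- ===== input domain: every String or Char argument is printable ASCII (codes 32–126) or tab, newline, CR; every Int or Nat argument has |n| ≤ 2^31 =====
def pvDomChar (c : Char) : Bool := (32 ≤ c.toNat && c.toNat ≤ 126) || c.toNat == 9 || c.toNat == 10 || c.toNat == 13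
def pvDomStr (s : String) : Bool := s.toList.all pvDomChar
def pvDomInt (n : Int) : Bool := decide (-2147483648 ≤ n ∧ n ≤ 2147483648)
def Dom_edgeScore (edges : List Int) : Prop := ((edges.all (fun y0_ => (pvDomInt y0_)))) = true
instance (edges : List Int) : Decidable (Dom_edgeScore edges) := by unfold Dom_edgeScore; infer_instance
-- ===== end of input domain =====

-- B replaces A's online running-max/tie-break tracking inside the update loop by an offline
-- decomposition: the loop only updates scores and records the (value, label) trace, and the
-- answer is computed afterwards as the smallest label among trace entries attaining the
-- maximal value; objective: simpler, same O(n) cost.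

-- ===== PORT A =====
-- one step of A's loop body: d[a] += i, then running max / smallest-tie update
-- (pyGetD/pySetD are the total forms of Python's d[a]; Pre_ keeps every index in range)
def stepA (st : Int × Int × List Int) (p : Int × Int) : Int × Int × List Int :=
  let v := PySem.List.pyGetD st.2.2 p.2 0 + p.1
  let d2 := PySem.List.pySetD st.2.2 p.2 v
  if st.2.1 < v then (p.2, v, d2)
  else if st.2.1 = v ∧ p.2 < st.1 then (p.2, st.2.1, d2)
  else (st.1, st.2.1, d2)

def edgeScore (edges : List Int) : Int :=
  ((PySem.List.enumerate edges 0).foldl stepA (0, 0, List.replicate edges.length 0)).1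

-- ===== PORT B =====
-- one step of B's loop body: d[a] += i, then record (d[a], a) in the trace
def stepB (st : List Int × List (Int × Int)) (p : Int × Int) : List Int × List (Int × Int) :=
  let v := PySem.List.pyGetD st.1 p.2 0 + p.1
  (PySem.List.pySetD st.1 p.2 v, st.2 ++ [(v, p.2)])

-- max(...)/min(...) of Source B are over nonempty lists (the trace is seeded with (0, 0)),
-- so max?/min? are always `some`; .getD 0 only totalizes them.
def edgeScore_alt (edges : List Int) : Int :=
  let st := (PySem.List.enumerate edges 0).foldl stepB
    (List.replicate edges.length 0, [((0 : Int), (0 : Int))])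
  let best := (PySem.List.max? (st.2.map Prod.fst) (fun v => v)).getD 0
  (PySem.List.min? ((st.2.filter (fun q => q.1 == best)).map Prod.snd) (fun v => v)).getD 0

-- ===== PRECONDITION & SPEC =====
-- Pre_ is exactly where the Python A returns normally: every label must be a valid Python
-- index into the length-n score list (-n ≤ a < n); outside it A (and B) raise IndexError.
def Pre_edgeScore (edges : List Int) : Prop :=
  ∀ a ∈ edges, -(edges.length : Int) ≤ a ∧ a < (edges.length : Int)
instance (edges : List Int) : Decidable (Pre_edgeScore edges) := by
  unfold Pre_edgeScore; infer_instance

def pvWitness_edgeScore : List Int := [1, 0, 1]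

def Spec_edgeScore (edges : List Int) (out : Int) : Prop := out = edgeScore_alt edges
instance (edges : List Int) (out : Int) : Decidable (Spec_edgeScore edges out) := by
  unfold Spec_edgeScore; infer_instance

-- ===== CLAIM (what is proved, stated in full; the proofs are below) =====
def Claim_equal_edgeScore : Prop :=
  ∀ (edges : List Int), Dom_edgeScore edges → Pre_edgeScore edges →
    Spec_edgeScore edges (edgeScore edges)

-- ===== LEMMAS AND PROOFS =====

-- the loop invariant tying A's running (ans, ma) to B's trace: ma bounds every recorded
-- value, the pair (ma, ans) is itself recorded, and ans is least among labels recorded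
-- with value ma
def pvInv (ans ma : Int) (vals : List (Int × Int)) : Prop :=
  (∀ q ∈ vals, q.1 ≤ ma) ∧ (ma, ans) ∈ vals ∧
  (∀ q ∈ vals, q.1 = ma → ans ≤ q.2)

theorem pvInv_step (ans ma : Int) (d : List Int) (vals : List (Int × Int)) (p : Int × Int)
    (h : pvInv ans ma vals) :
    (stepB (d, vals) p).1 = (stepA (ans, ma, d) p).2.2 ∧
    pvInv (stepA (ans, ma, d) p).1 (stepA (ans, ma, d) p).2.1 (stepB (d, vals) p).2 := by
  obtain ⟨hle, hmem, hmin⟩ := h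
  have hB : stepB (d, vals) p
      = (PySem.List.pySetD d p.2 (PySem.List.pyGetD d p.2 0 + p.1),
         vals ++ [(PySem.List.pyGetD d p.2 0 + p.1, p.2)]) := rfl
  by_cases h1 : ma < PySem.List.pyGetD d p.2 0 + p.1
  · -- strict new maximum: the fresh entry is the unique maximal one
    have hA : stepA (ans, ma, d) p
        = (p.2, PySem.List.pyGetD d p.2 0 + p.1,
           PySem.List.pySetD d p.2 (PySem.List.pyGetD d p.2 0 + p.1)) := by
      simp only [stepA]; rw [if_pos h1]
    simp only [hA, hB]
    refine ⟨trivial, ?_, ?_, ?_⟩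
    · intro q hq
      rcases List.mem_append.mp hq with hq | hq
      · have := hle q hq; omega
      · simp only [List.mem_singleton] at hq; rw [hq]
    · exact List.mem_append.mpr (Or.inr (List.mem_singleton.mpr rfl))
    · intro q hq hq1
      rcases List.mem_append.mp hq with hq | hq
      · have := hle q hq; omega
      · simp only [List.mem_singleton] at hq; rw [hq]
  · by_cases h2 : ma = PySem.List.pyGetD d p.2 0 + p.1 ∧ p.2 < ans
    · -- tie with a smaller label
      have hA : stepA (ans, ma, d) p
          = (p.2, ma,
             PySem.List.pySetD d p.2 (PySem.List.pyGetD d p.2 0 + p.1)) := by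
        simp only [stepA]; rw [if_neg h1, if_pos h2]
      simp only [hA, hB]
      refine ⟨trivial, ?_, ?_, ?_⟩
      · intro q hq
        rcases List.mem_append.mp hq with hq | hq
        · exact hle q hq
        · simp only [List.mem_singleton] at hq; rw [hq]; simp; omega
      · refine List.mem_append.mpr (Or.inr ?_)
        rw [← h2.1]; exact List.mem_singleton.mpr rfl
      · intro q hq hq1
        rcases List.mem_append.mp hq with hq | hq
        · have := hmin q hq hq1; omega
        · simp only [List.mem_singleton] at hq; rw [hq]
    · -- neither: (ans, ma) unchanged
      have hA : stepA (ans, ma, d) p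
          = (ans, ma,
             PySem.List.pySetD d p.2 (PySem.List.pyGetD d p.2 0 + p.1)) := by
        simp only [stepA]; rw [if_neg h1, if_neg h2]
      simp only [hA, hB]
      refine ⟨trivial, ?_, ?_, ?_⟩
      · intro q hq
        rcases List.mem_append.mp hq with hq | hq
        · exact hle q hq
        · simp only [List.mem_singleton] at hq; rw [hq]; simp; omega
      · exact List.mem_append.mpr (Or.inl hmem)
      · intro q hq hq1
        rcases List.mem_append.mp hq with hq | hq
        · exact hmin q hq hq1
        · simp only [List.mem_singleton] at hq; rw [hq] at hq1 ⊢
          simp only [] at hq1 ⊢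
          omega

theorem pvInv_fold :
    ∀ (ps : List (Int × Int)) (ans ma : Int) (d : List Int) (vals : List (Int × Int)),
      pvInv ans ma vals →
      (ps.foldl stepB (d, vals)).1 = (ps.foldl stepA (ans, ma, d)).2.2 ∧
      pvInv (ps.foldl stepA (ans, ma, d)).1 (ps.foldl stepA (ans, ma, d)).2.1
        (ps.foldl stepB (d, vals)).2 := by
  intro ps
  induction ps with
  | nil => intro ans ma d vals h; exact ⟨rfl, h⟩
  | cons p t ih =>
    intro ans ma d vals h
    obtain ⟨hd, hinv⟩ := pvInv_step ans ma d vals p h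
    simp only [List.foldl_cons]
    have hAe : stepA (ans, ma, d) p
        = ((stepA (ans, ma, d) p).1, (stepA (ans, ma, d) p).2.1,
           (stepA (ans, ma, d) p).2.2) := rfl
    have hBe : stepB (d, vals) p
        = ((stepB (d, vals) p).1, (stepB (d, vals) p).2) := rfl
    rw [hAe, hBe, hd]
    exact ih _ _ _ _ hinv

theorem pvInv_init : pvInv 0 0 [((0 : Int), (0 : Int))] := by
  refine ⟨?_, ?_, ?_⟩
  · intro q hq; simp only [List.mem_singleton] at hq; rw [hq]
  · exact List.mem_singleton.mpr rfl
  · intro q hq _; simp only [List.mem_singleton] at hq; rw [hq]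

-- ===== VERDICT (by name: the statement is the Claim_ definition above) =====
theorem edgeScore_spec : Claim_equal_edgeScore := by
  intro edges _ _
  unfold Spec_edgeScore
  obtain ⟨hd, hle, hmem, hmin⟩ :=
    pvInv_fold (PySem.List.enumerate edges 0) 0 0
      (List.replicate edges.length 0) [((0 : Int), (0 : Int))] pvInv_init
  set R := (PySem.List.enumerate edges 0).foldl stepA
    (0, 0, List.replicate edges.length 0) with hR
  set S := (PySem.List.enumerate edges 0).foldl stepB
    (List.replicate edges.length 0, [((0 : Int), (0 : Int))]) with hS
  -- the trace's maximal value is A's final ma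
  have hbest : (PySem.List.max? (S.2.map Prod.fst) (fun v => v)).getD 0 = R.2.1 := by
    cases hmx : PySem.List.max? (S.2.map Prod.fst) (fun v => v) with
    | none =>
      rw [PySem.List.max?_eq_none_iff] at hmx
      have : R.2.1 ∈ S.2.map Prod.fst := List.mem_map_of_mem hmem
      rw [hmx] at this
      exact absurd this (List.not_mem_nil)
    | some m =>
      have hm1 : m ∈ S.2.map Prod.fst := PySem.List.max?_mem hmx
      have hm2 := PySem.List.max?_isMax hmx
      have hma : R.2.1 ∈ S.2.map Prod.fst := List.mem_map_of_mem hmem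
      obtain ⟨q, hq, rfl⟩ := List.mem_map.mp hm1
      have h1 : q.1 ≤ R.2.1 := hle q hq
      have h2 : R.2.1 ≤ q.1 := hm2 _ hma
      simp only [Option.getD_some]
      omega
  show R.1 = (PySem.List.min? ((S.2.filter (fun q =>
      q.1 == (PySem.List.max? (S.2.map Prod.fst) (fun v => v)).getD 0)).map Prod.snd)
      (fun v => v)).getD 0
  rw [hbest]
  -- the least label among maximal trace entries is A's final ans
  have hansmem : R.1 ∈ (S.2.filter (fun q => q.1 == R.2.1)).map Prod.snd := by
    refine List.mem_map.mpr ⟨(R.2.1, R.1), ?_, rfl⟩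
    exact List.mem_filter.mpr ⟨hmem, by simp⟩
  cases hmn : PySem.List.min? ((S.2.filter (fun q => q.1 == R.2.1)).map Prod.snd)
      (fun v => v) with
  | none =>
    rw [PySem.List.min?_eq_none_iff] at hmn
    rw [hmn] at hansmem
    exact absurd hansmem (List.not_mem_nil)
  | some m =>
    have hm1 := PySem.List.min?_mem hmn
    have hm2 := PySem.List.min?_isMin hmn
    obtain ⟨q, hq, rfl⟩ := List.mem_map.mp hm1
    have hqf := List.mem_filter.mp hq
    have hq1 : q.1 = R.2.1 := by
      have := hqf.2; simpa using this
    have h1 : R.1 ≤ q.2 := hmin q hqf.1 hq1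
    have h2 : q.2 ≤ R.1 := hm2 _ hansmem
    simp only [Option.getD_some]
    omega
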